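-- pv_equiv track=rewrite | github.com/SenseiDewey/app_tune_personality_response | backend/utils.py | trim_chat_history
-- ===== SOURCE A (Python) =====
-- from typing import Any, Dict, List, Optional
--
-- def trim_chat_history(
--     chat_history: List[Dict[str, str]], max_messages: int
-- ) -> List[Dict[str, str]]:
--     filtered = [
--         message
--         for message in chat_history
--         if message.get("role") in ("user", "assistant")
--     ]
--     if max_messages > 0 and len(filtered) > max_messages:
--         return filtered[-max_messages:]
--     return filtered
-- ===== SOURCE B (Python) =====
-- def trim_chat_history(chat_history, max_messages):
--     def wanted(message):
--         return message.get("role") in ("user", "assistant")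
--
--     if max_messages <= 0:
--         return [m for m in chat_history if wanted(m)]
--     picked = []
--     for m in reversed(chat_history):
--         if wanted(m):
--             picked.append(m)
--             if len(picked) == max_messages:
--                 break
--     picked.reverse()
--     return picked
-- ===== Notes on version B (the rewrite author's own statement) =====
-- stated objective: alternative
-- what changed: Instead of materialising the whole filtered list and slicing its tail, B walks the history backwards collecting matching messages with early termination once max_messages are found, then reverses the collected prefix.
import Mathlib
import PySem

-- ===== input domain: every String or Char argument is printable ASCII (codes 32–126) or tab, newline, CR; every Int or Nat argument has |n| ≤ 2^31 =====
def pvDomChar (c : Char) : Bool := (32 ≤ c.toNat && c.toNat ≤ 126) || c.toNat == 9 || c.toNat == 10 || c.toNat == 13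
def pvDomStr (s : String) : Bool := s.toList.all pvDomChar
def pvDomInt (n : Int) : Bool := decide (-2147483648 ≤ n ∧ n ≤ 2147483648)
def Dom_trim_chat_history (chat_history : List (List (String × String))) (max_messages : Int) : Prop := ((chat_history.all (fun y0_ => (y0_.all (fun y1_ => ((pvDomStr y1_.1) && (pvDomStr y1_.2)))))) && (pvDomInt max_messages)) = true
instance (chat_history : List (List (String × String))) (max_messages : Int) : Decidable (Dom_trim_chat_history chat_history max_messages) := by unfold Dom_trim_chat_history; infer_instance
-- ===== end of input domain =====

-- B replaces filter-then-slice by a backward collect with early termination; same results, alternative decomposition.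


-- ===== PORT A =====
-- message.get("role") in ("user", "assistant")
def pvRoleOk (m : List (String × String)) : Bool :=
  (PySem.Dict.mk m).get? "role" == some "user" || (PySem.Dict.mk m).get? "role" == some "assistant"

def trim_chat_history (chat_history : List (List (String × String))) (max_messages : Int) : List (List (String × String)) :=
  let filtered := chat_history.filter pvRoleOk
  if max_messages > 0 ∧ (filtered.length : Int) > max_messages then
    PySem.List.slice filtered (some (-max_messages)) none
  else
    filtered

-- ===== PORT B =====
-- B's wanted(message)
def pvWanted (m : List (String × String)) : Bool :=
  (PySem.Dict.mk m).get? "role" == some "user" || (PySem.Dict.mk m).get? "role" == some "assistant"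

-- the loop over reversed(chat_history): append a matching message, break once len(picked) == k
def pvCollect : List (List (String × String)) → Nat → List (List (String × String))
  | [], _ => []
  | m :: rest, k =>
      if pvWanted m then
        m :: (if k - 1 = 0 then [] else pvCollect rest (k - 1))
      else
        pvCollect rest k

def trim_chat_history_alt (chat_history : List (List (String × String))) (max_messages : Int) : List (List (String × String)) :=
  if max_messages ≤ 0 then
    chat_history.filter pvWanted
  else
    (pvCollect chat_history.reverse max_messages.toNat).reverse

-- ===== PRECONDITION & SPEC =====
def Spec_trim_chat_history (chat_history : List (List (String × String))) (max_messages : Int) (out : List (List (String × String))) : Prop := out = trim_chat_history_alt chat_history max_messages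
instance (chat_history : List (List (String × String))) (max_messages : Int) (out : List (List (String × String))) : Decidable (Spec_trim_chat_history chat_history max_messages out) := by unfold Spec_trim_chat_history; infer_instance

-- ===== CLAIM (what is proved, stated in full; the proofs are below) =====
def Claim_equal_trim_chat_history : Prop := ∀ (chat_history : List (List (String × String))) (max_messages : Int), Dom_trim_chat_history chat_history max_messages → Spec_trim_chat_history chat_history max_messages (trim_chat_history chat_history max_messages)

-- ===== LEMMAS AND PROOFS =====
theorem pvCollect_eq_take_filter (l : List (List (String × String))) (k : Nat) (hk : 1 ≤ k) :
    pvCollect l k = (l.filter pvWanted).take k := by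
  induction l generalizing k with
  | nil => simp [pvCollect]
  | cons m rest ih =>
    by_cases hm : pvWanted m
    · rcases Nat.lt_or_ge 1 k with h1 | h1
      · simp [pvCollect, hm, Nat.sub_eq_zero_iff_le, Nat.not_le.mpr h1,
          ih (k - 1) (by omega)]
        rw [show k = (k - 1) + 1 by omega]
        simp
      · have : k = 1 := by omega
        subst this
        simp [pvCollect, hm]
    · simp [pvCollect, hm, ih k hk]

theorem reverse_take_reverse (l : List (List (String × String))) (k : Nat) :
    (l.reverse.take k).reverse = l.drop (l.length - k) := by
  induction l with
  | nil => simp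
  | cons m rest ih =>
    rcases Nat.lt_or_ge k (rest.length + 1) with h | h
    · have hlen : (rest.reverse ++ [m]).take k = rest.reverse.take k := by
        rw [List.take_append_of_le_length (by simpa using Nat.lt_succ_iff.mp h)]
      simp only [List.reverse_cons, hlen, ih]
      have : (m :: rest).length - k = (rest.length - k) + 1 := by
        simp only [List.length_cons]; omega
      rw [this, List.drop_succ_cons]
    · have h1 : (rest.reverse ++ [m]).take k = rest.reverse ++ [m] := by
        apply List.take_of_length_le; simpa using h
      have h2 : (m :: rest).length - k = 0 := by simp only [List.length_cons]; omega
      have h3 : rest.length + 1 - k = 0 := by omega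
      simp [h1, h3]

-- ===== VERDICT (by name: the statement is the Claim_ definition above) =====

theorem trim_chat_history_spec : Claim_equal_trim_chat_history := by
  intro ch mx _
  unfold Spec_trim_chat_history
  simp only [trim_chat_history, trim_chat_history_alt]
  have hrole : pvRoleOk = pvWanted := rfl
  rw [hrole]
  by_cases hle : mx ≤ 0
  · rw [if_pos hle, if_neg (fun h => absurd h.1 (by omega))]
  · have hk : 1 ≤ mx.toNat := by omega
    rw [if_neg hle, pvCollect_eq_take_filter _ _ hk,
      List.filter_reverse, reverse_take_reverse]
    by_cases hlen : ((ch.filter pvWanted).length : Int) > mx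
    · rw [if_pos ⟨by omega, hlen⟩]
      have hmx : -mx = -((mx.toNat : Nat) : Int) := by omega
      rw [hmx, PySem.List.slice_from_neg_natCast _ _ hk]
    · rw [if_neg (fun h => absurd h.2 hlen)]
      have h0 : (ch.filter pvWanted).length - mx.toNat = 0 := by omega
      rw [h0, List.drop_zero]
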